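-- pv_equiv track=rewrite | github.com/divyanbavan/haddock3 | src/haddock/modules/analysis/alascan/__init__.py | get_index_list
-- ===== SOURCE A (Python) =====
-- def get_index_list(nmodels, ncores):
--     """Optimal distribution of models among cores"""
--     spc = nmodels // ncores
--     # now the remainder
--     rem = nmodels % ncores
--     # now the list of indexes to be used for the RMSD calculation
--     index_list = [0]
--     for core in range(ncores):
--         if core < rem:
--             index_list.append(index_list[-1] + spc + 1)
--         else:
--             index_list.append(index_list[-1] + spc)
--     return index_list
-- ===== SOURCE B (Python) =====
-- def get_index_list(nmodels, ncores):
--     """Optimal distribution of models among cores"""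
--     spc = nmodels // ncores
--     rem = nmodels % ncores
--     return [i * spc + min(i, rem) for i in range(ncores + 1)]
-- ===== Notes on version B (the rewrite author's own statement) =====
-- stated objective: simpler
-- what changed: Replaces the accumulator loop that appends to the previous element with a closed-form per-index comprehension [i*spc + min(i, rem) for i in range(ncores+1)], computing each boundary independently.
-- outside the precondition, e.g. on get_index_list(5, -2): A returns [0], B returns []
import Mathlib
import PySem

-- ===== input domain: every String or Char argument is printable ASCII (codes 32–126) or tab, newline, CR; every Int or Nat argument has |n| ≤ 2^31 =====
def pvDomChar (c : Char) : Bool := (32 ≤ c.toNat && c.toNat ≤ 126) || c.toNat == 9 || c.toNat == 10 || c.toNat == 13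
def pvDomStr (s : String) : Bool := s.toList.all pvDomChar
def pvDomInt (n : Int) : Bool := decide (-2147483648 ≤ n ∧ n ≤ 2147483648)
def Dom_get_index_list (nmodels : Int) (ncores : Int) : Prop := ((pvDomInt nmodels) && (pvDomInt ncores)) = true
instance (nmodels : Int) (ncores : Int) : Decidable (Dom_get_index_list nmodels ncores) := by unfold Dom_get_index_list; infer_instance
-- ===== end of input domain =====

-- B replaces A's running-accumulator append loop with a closed-form per-index list
-- [i*spc + min(i, rem) for i in range(ncores+1)] (objective: simpler).


-- ===== PORT A =====
-- the 'none' branch of index_list[-1] is unreachable: the list starts at [0] and only grows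
def get_index_list (nmodels : Int) (ncores : Int) : List Int :=
  let spc := PySem.Int.floordiv nmodels ncores
  let rem := PySem.Int.mod nmodels ncores
  (PySem.List.pyRange 0 ncores 1).foldl (fun index_list core =>
    match PySem.List.pyGet? index_list (-1) with
    | some last =>
        if core < rem then index_list ++ [last + spc + 1]
        else index_list ++ [last + spc]
    | none => index_list) [0]

-- ===== PORT B =====
def get_index_list_alt (nmodels : Int) (ncores : Int) : List Int :=
  let spc := PySem.Int.floordiv nmodels ncores
  let rem := PySem.Int.mod nmodels ncores
  (PySem.List.pyRange 0 (ncores + 1) 1).map (fun i => i * spc + min i rem)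

-- ===== PRECONDITION & SPEC =====
-- Pre_ requires a positive core count: at ncores = 0 Python A raises ZeroDivisionError, and
-- ncores < 0 (a negative core count) is outside the task's natural domain, on which A's [0] is
-- an accident of its seeded accumulator and B's [] of its empty range.
def Pre_get_index_list (nmodels : Int) (ncores : Int) : Prop := 0 < ncores
instance (nmodels : Int) (ncores : Int) : Decidable (Pre_get_index_list nmodels ncores) := by unfold Pre_get_index_list; infer_instance
def pvWitness_get_index_list : Int × Int := (7, 3)
def Spec_get_index_list (nmodels : Int) (ncores : Int) (out : List Int) : Prop := out = get_index_list_alt nmodels ncores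
instance (nmodels : Int) (ncores : Int) (out : List Int) : Decidable (Spec_get_index_list nmodels ncores out) := by unfold Spec_get_index_list; infer_instance

-- ===== CLAIM (what is proved, stated in full; the proofs are below) =====
def Claim_equal_get_index_list : Prop := ∀ (nmodels : Int) (ncores : Int), Dom_get_index_list nmodels ncores → Pre_get_index_list nmodels ncores → Spec_get_index_list nmodels ncores (get_index_list nmodels ncores)

-- ===== LEMMAS AND PROOFS =====

-- the closed form B computes at index i
def pvF (spc rem i : Int) : Int := i * spc + min i rem

-- A's loop step
def pvStep (spc rem : Int) (index_list : List Int) (core : Int) : List Int :=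
  match PySem.List.pyGet? index_list (-1) with
  | some last =>
      if core < rem then index_list ++ [last + spc + 1]
      else index_list ++ [last + spc]
  | none => index_list

lemma pvF_succ (spc rem : Int) (i : Int) :
    pvF spc rem (i + 1) = pvF spc rem i + spc + (if i < rem then 1 else 0) := by
  unfold pvF
  by_cases h : i < rem
  · rw [min_eq_left (by omega), min_eq_left (by omega), if_pos h]; ring
  · rw [min_eq_right (by omega), min_eq_right (by omega), if_neg h]; ring

lemma pvLast_map_range (f : Int → Int) (n : Nat) :
    PySem.List.pyGet? ((PySem.List.pyRange 0 ((n : Int) + 1) 1).map f) (-1) = some (f n) := by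
  rw [PySem.List.pyRange_one_succ_right (by positivity)]
  simp [PySem.List.pyGet?, PySem.List.pyIdx?]

-- invariant: after processing cores 0..n-1, the list is the closed form on 0..n
lemma pvFoldl_invariant (spc rem : Int) (hrem : 0 ≤ rem) (n : Nat) :
    (PySem.List.pyRange 0 (n : Int) 1).foldl (pvStep spc rem) [0] =
      (PySem.List.pyRange 0 ((n : Int) + 1) 1).map (pvF spc rem) := by
  induction n with
  | zero =>
      norm_num [PySem.List.pyRange_one, pvF, PySem.List.pyRange_one_eq_nil]
      exact hrem
  | succ k ih =>
      push_cast
      rw [PySem.List.pyRange_one_succ_right (a := 0) (b := (k : Int)) (by positivity),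
        List.foldl_append, ih]
      simp only [List.foldl_cons, List.foldl_nil]
      rw [show ((k : Int) + 1 + 1) = ((k : Int) + 1) + 1 from by ring,
        PySem.List.pyRange_one_succ_right (a := 0) (b := (k : Int) + 1) (by positivity),
        List.map_append]
      unfold pvStep
      rw [pvLast_map_range]
      rw [show List.map (pvF spc rem) [(k : Int) + 1] = [pvF spc rem ((k : Int) + 1)] from rfl,
        pvF_succ spc rem _]
      split_ifs with h <;> simp

-- ===== VERDICT (by name: the statement is the Claim_ definition above) =====
theorem get_index_list_spec : Claim_equal_get_index_list := by
  intro nmodels ncores _ hpre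
  unfold Spec_get_index_list get_index_list get_index_list_alt
  have hrem : 0 ≤ PySem.Int.mod nmodels ncores := PySem.Int.mod_nonneg nmodels hpre
  unfold Pre_get_index_list at hpre
  obtain ⟨n, rfl⟩ : ∃ n : Nat, ncores = (n : Int) := ⟨ncores.toNat, by omega⟩
  exact pvFoldl_invariant _ _ hrem n
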